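-- pv_equiv track=rewrite | github.com/neomatrix369/microgpt-experiments | mgpt/evaluation.py | is_nonsense
-- ===== SOURCE A (Python) =====
-- _MAX_CONSONANT_RUN = 4
--
-- _VOWELS = frozenset("aeiouy")
--
-- _IMPOSSIBLE_STARTS = frozenset(
--     {
--         "zx",
--         "bx",
--         "dx",
--         "fx",
--         "gx",
--         "jx",
--         "kx",
--         "px",
--         "qx",
--         "sx",
--         "tx",
--         "vx",
--         "wx",
--         "xx",
--     }
-- )
--
-- def is_pronounceable(word: str) -> bool:
--     if not word:
--         return False
--     word_lower = word.lower()
--     if not any(c in _VOWELS for c in word_lower):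
--         return False
--     consonant_run = 0
--     for char in word_lower:
--         if char not in _VOWELS:
--             consonant_run += 1
--             if consonant_run > _MAX_CONSONANT_RUN:
--                 return False
--         else:
--             consonant_run = 0
--     for i in range(len(word_lower) - 2):
--         if word_lower[i] == word_lower[i + 1] == word_lower[i + 2]:
--             return False
--     if len(word_lower) >= 2 and word_lower[:2] in _IMPOSSIBLE_STARTS:
--         return False
--     return True
--
-- def is_nonsense(word: str) -> bool:
--     if len(word) < 2:
--         return True
--     word_lower = word.lower()
--     if len(set(word_lower)) == 1:
--         return True
--     if all(c in _VOWELS for c in word_lower):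
--         return True
--     if not any(c in _VOWELS for c in word_lower):
--         return True
--     if not is_pronounceable(word):
--         return True
--     return False
-- ===== SOURCE B (Python) =====
-- _VOWELS = frozenset("aeiouy")
--
-- _IMPOSSIBLE_STARTS = frozenset(
--     {"zx","bx","dx","fx","gx","jx","kx","px","qx","sx","tx","vx","wx","xx"}
-- )
--
-- def is_nonsense(word: str) -> bool:
--     # single pass: compute all nonsense conditions in one traversal
--     if len(word) < 2:
--         return True
--     w = word.lower()
--     has_vowel = False
--     has_consonant = False
--     all_same = True
--     run = 0
--     max_run = 0
--     triple = False
--     prev1 = None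
--     prev2 = None
--     for c in w:
--         if c in _VOWELS:
--             has_vowel = True
--             run = 0
--         else:
--             has_consonant = True
--             run += 1
--             if run > max_run:
--                 max_run = run
--         if c != w[0]:
--             all_same = False
--         if c == prev1 and prev1 == prev2:
--             triple = True
--         prev2 = prev1
--         prev1 = c
--     bad_start = w[:2] in _IMPOSSIBLE_STARTS
--     return (all_same or not has_vowel or not has_consonant
--             or max_run > 4 or triple or bad_start)
-- ===== Notes on version B (the rewrite author's own statement) =====
-- stated objective: alternative
-- what changed: A scans the lowered word five separate times (set() build, all(), any(), consonant-run loop and triple-repeat index loop inside is_pronounceable); B makes a single pass maintaining has_vowel/has_consonant flags, an all-same flag, a running max consonant run and a sliding two-char window for triple repeats, then ORs the conditions.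
import Mathlib
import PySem

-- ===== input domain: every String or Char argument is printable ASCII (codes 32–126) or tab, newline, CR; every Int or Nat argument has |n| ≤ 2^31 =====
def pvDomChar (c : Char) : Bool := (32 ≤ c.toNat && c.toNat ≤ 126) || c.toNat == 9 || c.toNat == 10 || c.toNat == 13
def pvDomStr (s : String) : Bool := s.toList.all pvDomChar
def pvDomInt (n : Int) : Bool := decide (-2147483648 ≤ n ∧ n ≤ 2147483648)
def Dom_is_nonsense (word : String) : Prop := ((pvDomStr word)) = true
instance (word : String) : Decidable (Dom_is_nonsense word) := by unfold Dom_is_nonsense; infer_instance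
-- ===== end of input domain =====

-- B replaces A's five separate scans of the word (set(), all(), any(), two loops in
-- is_pronounceable) by a single pass maintaining flags; same algorithmic cost, one traversal.

-- ===== PORT A =====
def pvVowels : List Char := ['a', 'e', 'i', 'o', 'u', 'y']

def pvImpStarts : List (List Char) :=
  [['z','x'],['b','x'],['d','x'],['f','x'],['g','x'],['j','x'],['k','x'],
   ['p','x'],['q','x'],['s','x'],['t','x'],['v','x'],['w','x'],['x','x']]

-- A's consonant-run loop: run += 1 then early 'return False' when run > 4
def pvRunLoop : List Char → Nat → Bool
  | [], _ => true
  | c :: rest, run =>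
    if c ∈ pvVowels then pvRunLoop rest 0
    else if run + 1 > 4 then false
    else pvRunLoop rest (run + 1)

-- A's 'for i in range(len(w) - 2)' triple-repeat loop, as a counting index loop
def pvTripleLoop (w : List Char) (i : Nat) : Bool :=
  if _h : i + 2 < w.length then
    if w[i]? == w[i+1]? && w[i+1]? == w[i+2]? then false
    else pvTripleLoop w (i + 1)
  else true
termination_by w.length - i

def pvIsPronounceableL (w : List Char) : Bool :=
  if w = [] then false
  else
    let wl := PySem.Chars.lower w
    if ¬ wl.any (fun c => c ∈ pvVowels) then false
    else if pvRunLoop wl 0 = false then false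
    else if pvTripleLoop wl 0 = false then false
    -- word_lower[:2] on a list is its first two characters (slice-to = take)
    else if 2 ≤ wl.length ∧ wl.take 2 ∈ pvImpStarts then false
    else true

def is_nonsense (word : String) : Bool :=
  let w := word.toList
  if w.length < 2 then true
  else
    let wl := PySem.Chars.lower w
    if (PySem.Set.ofList wl).length = 1 then true
    else if wl.all (fun c => c ∈ pvVowels) then true
    else if ¬ wl.any (fun c => c ∈ pvVowels) then true
    else if pvIsPronounceableL w = false then true
    else false

-- ===== PORT B =====
structure NState where
  hasV : Bool
  hasC : Bool
  allSame : Bool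
  run : Nat
  maxRun : Nat
  triple : Bool
  prev1 : Option Char
  prev2 : Option Char
deriving Repr, DecidableEq

def nInit : NState := ⟨false, false, true, 0, 0, false, none, none⟩

def nStep (first : Char) (st : NState) (c : Char) : NState :=
  let st1 :=
    if c ∈ pvVowels then { st with hasV := true, run := 0 }
    else
      let r := st.run + 1
      { st with hasC := true, run := r,
                maxRun := if r > st.maxRun then r else st.maxRun }
  let st2 := if c ≠ first then { st1 with allSame := false } else st1
  let st3 := if some c = st2.prev1 ∧ st2.prev1 = st2.prev2
             then { st2 with triple := true } else st2
  { st3 with prev2 := st3.prev1, prev1 := some c }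

def is_nonsense_alt (word : String) : Bool :=
  let w := word.toList
  if w.length < 2 then true
  else
    let wl := PySem.Chars.lower w
    let first := PySem.List.pyGetD wl 0 ' '   -- w[0]; wl is nonempty here
    let st := wl.foldl (nStep first) nInit
    let badStart := wl.take 2 ∈ pvImpStarts   -- w[:2] in _IMPOSSIBLE_STARTS
    st.allSame || !st.hasV || !st.hasC || decide (st.maxRun > 4) || st.triple || badStart

-- ===== PRECONDITION & SPEC =====
def Spec_is_nonsense (word : String) (out : Bool) : Prop := out = is_nonsense_alt word
instance (word : String) (out : Bool) : Decidable (Spec_is_nonsense word out) := by unfold Spec_is_nonsense; infer_instance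

-- ===== CLAIM (what is proved, stated in full; the proofs are below) =====
def Claim_equal_is_nonsense : Prop := ∀ (word : String), Dom_is_nonsense word → Spec_is_nonsense word (is_nonsense word)

-- ===== LEMMAS AND PROOFS =====

-- window spec used to relate A's index loop and B's prev1/prev2 flags
def hasTriple : List Char → Bool
  | a :: b :: c :: t => (a == b && b == c) || hasTriple (b :: c :: t)
  | _ => false

def optL : Option Char → Option Char → List Char
  | _, none => []
  | none, some b => [b]
  | some a, some b => [a, b]

theorem foldl_hasV (f : Char) (l : List Char) (st : NState) :
    (l.foldl (nStep f) st).hasV = (st.hasV || l.any (fun c => decide (c ∈ pvVowels))) := by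
  induction l generalizing st with
  | nil => simp
  | cons c t ih =>
    simp only [List.foldl_cons, List.any_cons, ih]
    by_cases h : c ∈ pvVowels <;> simp [nStep, h] <;> split_ifs <;> simp
theorem foldl_hasC (f : Char) (l : List Char) (st : NState) :
    (l.foldl (nStep f) st).hasC = (st.hasC || l.any (fun c => !decide (c ∈ pvVowels))) := by
  induction l generalizing st with
  | nil => simp
  | cons c t ih =>
    simp only [List.foldl_cons, List.any_cons, ih]
    by_cases h : c ∈ pvVowels <;> simp [nStep, h] <;> split_ifs <;> simp
theorem foldl_allSame (f : Char) (l : List Char) (st : NState) :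
    (l.foldl (nStep f) st).allSame = (st.allSame && l.all (fun c => c == f)) := by
  induction l generalizing st with
  | nil => simp
  | cons c t ih =>
    simp only [List.foldl_cons, List.all_cons, ih]
    by_cases h : c = f <;> by_cases hv : c ∈ pvVowels <;>
      simp [nStep, h, hv] <;> split_ifs <;> simp_all

theorem foldl_maxRun_mono (f : Char) (l : List Char) (st : NState) :
    st.maxRun ≤ (l.foldl (nStep f) st).maxRun := by
  induction l generalizing st with
  | nil => simp
  | cons c t ih =>
    refine le_trans ?_ (ih _)
    by_cases hv : c ∈ pvVowels <;> simp [nStep, hv] <;> split_ifs <;> simp <;> omega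

theorem nStep_run_vowel (f c : Char) (st : NState) (hv : c ∈ pvVowels) :
    (nStep f st c).run = 0 := by
  simp [nStep, hv] <;> split_ifs <;> simp
theorem nStep_maxRun_vowel (f c : Char) (st : NState) (hv : c ∈ pvVowels) :
    (nStep f st c).maxRun = st.maxRun := by
  simp [nStep, hv] <;> split_ifs <;> simp
theorem nStep_run_cons (f c : Char) (st : NState) (hv : c ∉ pvVowels) :
    (nStep f st c).run = st.run + 1 := by
  simp [nStep, hv] <;> split_ifs <;> simp
theorem nStep_maxRun_cons (f c : Char) (st : NState) (hv : c ∉ pvVowels) :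
    (nStep f st c).maxRun = max st.maxRun (st.run + 1) := by
  simp [nStep, hv] <;> split_ifs <;> simp <;> omega
theorem nStep_prev1 (f c : Char) (st : NState) : (nStep f st c).prev1 = some c := by
  simp [nStep] <;> split_ifs <;> simp
theorem nStep_prev2 (f c : Char) (st : NState) : (nStep f st c).prev2 = st.prev1 := by
  simp [nStep] <;> split_ifs <;> simp
theorem nStep_triple (f c : Char) (st : NState) :
    (nStep f st c).triple = (st.triple || decide (some c = st.prev1 ∧ st.prev1 = st.prev2)) := by
  simp [nStep] <;> split_ifs <;> simp_all

theorem runLoop_iff (f : Char) (l : List Char) (st : NState) (hm : st.maxRun ≤ 4) :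
    pvRunLoop l st.run = decide ((l.foldl (nStep f) st).maxRun ≤ 4) := by
  induction l generalizing st with
  | nil => simp [pvRunLoop, hm]
  | cons c t ih =>
    rw [List.foldl_cons]
    by_cases hv : c ∈ pvVowels
    · rw [pvRunLoop, if_pos hv]
      have h1 := nStep_run_vowel f c st hv
      have h2 := nStep_maxRun_vowel f c st hv
      have := ih (nStep f st c) (by omega)
      rw [h1] at this
      exact this
    · rw [pvRunLoop, if_neg hv]
      have h1 := nStep_run_cons f c st hv
      have h2 := nStep_maxRun_cons f c st hv
      by_cases hr : st.run + 1 > 4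
      · rw [if_pos hr]
        have hmono := foldl_maxRun_mono f t (nStep f st c)
        rw [h2] at hmono
        have : ¬ ((t.foldl (nStep f) (nStep f st c)).maxRun ≤ 4) := by omega
        simp [this]
      · rw [if_neg hr]
        have := ih (nStep f st c) (by omega)
        rw [h1] at this
        exact this

theorem hasTriple_short (l : List Char) (h : l.length ≤ 2) : hasTriple l = false := by
  match l with
  | [] => rfl
  | [_] => rfl
  | [_, _] => rfl
  | _ :: _ :: _ :: _ => simp at h

theorem tripleLoop_eq (w : List Char) (i : Nat) :
    pvTripleLoop w i = !hasTriple (w.drop i) := by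
  by_cases h : i + 2 < w.length
  · have hi : i < w.length := by omega
    have hi1 : i + 1 < w.length := by omega
    have hd : w.drop i = w[i] :: w[i+1] :: w[i+2] :: w.drop (i+3) := by
      rw [List.drop_eq_getElem_cons hi, List.drop_eq_getElem_cons hi1,
          List.drop_eq_getElem_cons h]
    rw [pvTripleLoop, dif_pos h, hd]
    by_cases hw : w[i] = w[i+1] ∧ w[i+1] = w[i+2]
    · simp [hasTriple, List.getElem?_eq_getElem, hi, hi1, h, hw.1, hw.2]
    · have hrec := tripleLoop_eq w (i + 1)
      have hd1 : w.drop (i+1) = w[i+1] :: w[i+2] :: w.drop (i+3) := by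
        rw [List.drop_eq_getElem_cons hi1, List.drop_eq_getElem_cons h]
      rw [hd1] at hrec
      have hcond : (w[i]? == w[i+1]? && w[i+1]? == w[i+2]?) = false := by
        rw [List.getElem?_eq_getElem hi, List.getElem?_eq_getElem hi1,
            List.getElem?_eq_getElem h]
        simp only [Option.some_beq_some, Bool.and_eq_false_iff, beq_eq_false_iff_ne, ne_eq]
        tauto
      rw [hcond, if_neg (by simp), hrec]
      simp only [hasTriple]
      have : (w[i] == w[i+1] && w[i+1] == w[i+2]) = false := by
        simp only [Bool.and_eq_false_iff, beq_eq_false_iff_ne, ne_eq]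
        tauto
      rw [this, Bool.false_or]
  · rw [pvTripleLoop, dif_neg h]
    rw [hasTriple_short _ (by simp; omega)]
    rfl
termination_by w.length - i
decreasing_by omega

theorem foldl_triple (f : Char) (l : List Char) (st : NState) :
    (l.foldl (nStep f) st).triple = (st.triple || hasTriple (optL st.prev2 st.prev1 ++ l)) := by
  induction l generalizing st with
  | nil =>
    rw [List.foldl_nil, List.append_nil]
    cases h2 : st.prev2 <;> cases h1 : st.prev1 <;>
      simp [optL, hasTriple]
  | cons c t ih =>
    rw [List.foldl_cons, ih]
    rw [nStep_triple, nStep_prev1, nStep_prev2]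
    cases h2 : st.prev2 <;> cases h1 : st.prev1 <;>
      simp only [optL, h1, h2, List.cons_append, List.nil_append, hasTriple]
    · simp
    · simp
    · simp [h1]
    · rename_i a b
      have key : decide (some c = some b ∧ some b = some a) = (a == b && b == c) := by
        simp only [Option.some.injEq]
        apply Bool.eq_iff_iff.mpr
        simp only [decide_eq_true_eq, Bool.and_eq_true, beq_iff_eq]
        constructor <;> rintro ⟨rfl, rfl⟩ <;> exact ⟨rfl, rfl⟩
      rw [key]
      simp [Bool.or_assoc]

theorem set_len_one (c : Char) (rest : List Char) :
    ((PySem.Set.ofList (c :: rest)).length = 1) ↔ (∀ x ∈ rest, x = c) := by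
  constructor
  · intro h
    obtain ⟨y, hy⟩ := List.length_eq_one_iff.mp h
    have hc : c ∈ PySem.Set.ofList (c :: rest) := (PySem.Set.mem_ofList _ _).mpr (by simp)
    rw [hy] at hc; simp at hc
    intro x hx
    have : x ∈ PySem.Set.ofList (c :: rest) := (PySem.Set.mem_ofList _ _).mpr (by simp [hx])
    rw [hy] at this; simp at this
    rw [this, hc]
  · intro h
    have hmem : ∀ x ∈ PySem.Set.ofList (c :: rest), x = c := by
      intro x hx
      have := (PySem.Set.mem_ofList _ _).mp hx
      rcases List.mem_cons.mp this with h' | h'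
      · exact h'
      · exact h x h'
    have hc : c ∈ PySem.Set.ofList (c :: rest) := (PySem.Set.mem_ofList _ _).mpr (by simp)
    have nd := PySem.Set.nodup_ofList (c :: rest)
    cases hl : PySem.Set.ofList (c :: rest) with
    | nil => rw [hl] at hc; simp at hc
    | cons y ys =>
      cases hys : ys with
      | nil => simp
      | cons y2 ys2 =>
        exfalso
        rw [hl, hys] at hmem nd
        have hy : y = c := hmem y (by simp)
        have hy2 : y2 = c := hmem y2 (by simp)
        simp [hy, hy2] at nd

-- ===== VERDICT (by name: the statement is the Claim_ definition above) =====
theorem is_nonsense_spec : Claim_equal_is_nonsense := by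
  intro word _
  show is_nonsense word = is_nonsense_alt word
  simp only [is_nonsense, is_nonsense_alt]
  generalize word.toList = w
  by_cases hlen : w.length < 2
  · simp [hlen]
  · rw [if_neg hlen, if_neg hlen]
    have hlw : (PySem.Chars.lower w).length = w.length := by simp [PySem.Chars.lower]
    obtain ⟨c, rest, hcr⟩ : ∃ c rest, PySem.Chars.lower w = c :: rest := by
      cases h : PySem.Chars.lower w
      · rw [h] at hlw; simp at hlw; omega
      · exact ⟨_, _, rfl⟩
    have hfirst : PySem.List.pyGetD (PySem.Chars.lower w) 0 ' ' = c := by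
      rw [hcr]; simp [pysem]
    rw [hfirst]
    set wl := PySem.Chars.lower w with hwl
    set st := wl.foldl (nStep c) nInit with hst
    have hwne : w ≠ [] := by
      intro h; rw [h] at hlen; simp at hlen
    have hS : st.allSame = rest.all (fun x => x == c) := by
      rw [hst, foldl_allSame, hcr]; simp [nInit]
    have hV : st.hasV = wl.any (fun x => decide (x ∈ pvVowels)) := by
      rw [hst, foldl_hasV]; simp [nInit]
    have hCC : st.hasC = wl.any (fun x => !decide (x ∈ pvVowels)) := by
      rw [hst, foldl_hasC]; simp [nInit]
    have hR : pvRunLoop wl 0 = decide (st.maxRun ≤ 4) := by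
      have h := runLoop_iff c wl nInit (by simp [nInit])
      simpa [nInit] using h
    have hT : st.triple = hasTriple wl := by
      rw [hst, foldl_triple]; simp [nInit, optL]
    have hTL : pvTripleLoop wl 0 = !hasTriple wl := by
      simpa using tripleLoop_eq wl 0
    by_cases h1 : (PySem.Set.ofList wl).length = 1
    · rw [if_pos h1]
      have hall : st.allSame = true := by
        rw [hS]
        have := (set_len_one c rest).mp (by rw [hcr] at h1; exact h1)
        simp [List.all_eq_true]
        intro x hx; simpa using this x hx
      simp [hall]
    · rw [if_neg h1]
      have hSfalse : st.allSame = false := by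
        have hne : ¬ (∀ x ∈ rest, x = c) := by
          intro h; exact h1 (by rw [hcr]; exact (set_len_one c rest).mpr h)
        have hx : ∃ x ∈ rest, ¬ x = c := by simpa using hne
        rw [hS]
        simp only [List.all_eq_false]
        rcases hx with ⟨x, hx1, hx2⟩
        exact ⟨x, hx1, by simp [hx2]⟩
      by_cases h2 : wl.all (fun x => decide (x ∈ pvVowels)) = true
      · rw [if_pos h2]
        have : st.hasC = false := by
          rw [hCC]
          rw [List.all_eq_not_any_not] at h2
          simpa using h2
        simp [this]
      · rw [if_neg h2]
        by_cases h3 : wl.any (fun x => decide (x ∈ pvVowels)) = true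
        · rw [if_neg (by simp [h3])]
          have hCtrue : st.hasC = true := by
            rw [hCC]
            rcases List.all_eq_false.mp (Bool.eq_false_iff.mpr h2) with ⟨x, hx1, hx2⟩
            exact List.any_eq_true.mpr ⟨x, hx1, by simp_all⟩
          have hVtrue : st.hasV = true := by rw [hV]; exact h3
          have hpron : pvIsPronounceableL w =
              (if pvRunLoop wl 0 = false then false
               else if pvTripleLoop wl 0 = false then false
               else if 2 ≤ wl.length ∧ wl.take 2 ∈ pvImpStarts then false else true) := by
            rw [pvIsPronounceableL, if_neg hwne, ← hwl, if_neg (by simp [h3])]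
          rw [hpron]
          by_cases h4 : pvRunLoop wl 0 = false
          · rw [if_pos h4]
            have : decide (st.maxRun > 4) = true := by
              rw [h4] at hR; simp at hR; simp [hR]
            simp [this]
          · rw [if_neg h4]
            have hRt : decide (st.maxRun > 4) = false := by
              rw [Bool.not_eq_false] at h4; rw [h4] at hR; simp at hR ⊢; omega
            by_cases h5 : pvTripleLoop wl 0 = false
            · rw [if_pos h5]
              have : st.triple = true := by
                rw [h5] at hTL; simp at hTL; rw [hT, hTL]
              simp [this]
            · rw [if_neg h5]
              have hTf : st.triple = false := by
                rw [Bool.not_eq_false] at h5; rw [h5] at hTL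
                rw [hT]; simpa using hTL.symm
              by_cases h6 : 2 ≤ wl.length ∧ wl.take 2 ∈ pvImpStarts
              · rw [if_pos h6]
                simp [h6.2]
              · rw [if_neg h6]
                have hge2 : 2 ≤ wl.length := by rw [hwl, hlw]; omega
                have hpre : wl.take 2 ∉ pvImpStarts := fun hc => h6 ⟨hge2, hc⟩
                simp [hSfalse, hVtrue, hCtrue, hRt, hTf, hpre]
        · rw [if_pos (by simp [h3])]
          have : st.hasV = false := by rw [hV]; simpa using h3
          simp [this]
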